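-- pv_equiv track=rewrite | github.com/summerfang/study | nbox/python/nbox/src/nbox.py | box_combination
-- ===== SOURCE A (Python) =====
-- def box_combination(n):
--     """
--     Return a list of combination of row, column when n boxes
--
--         Parameters:
--             n (int): How many boxes will be put into container
--
--         Returns:
--             combinations (list contains row and col pair, eg [[row1,col1],[row2,col2],...,[rown,coln]]): Return a list which contains any possible row and col combination when boxes is n
--
--     """
--     if not isinstance(n, int) or n <= 0:
--         raise ValueError("n has to be positive integer")
--
--     combinations = list()
--
--     for i in range(1, n + 1):
--         y = 1
--
--         while i * y < n:
--             y = y + 1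
--
--         item = list()
--         item.append(i)
--         item.append(y)
--
--         combinations.append(item)
--
--     return combinations
-- ===== SOURCE B (Python) =====
-- def box_combination(n):
--     if not isinstance(n, int) or n <= 0:
--         raise ValueError("n has to be positive integer")
--     return [[i, (n + i - 1) // i] for i in range(1, n + 1)]
-- ===== Notes on version B (the rewrite author's own statement) =====
-- stated objective: faster
-- what changed: Replaces the inner while-loop that increments y until i*y >= n with the closed-form ceiling division (n+i-1)//i, turning the O(n log n) double loop into a single O(n) comprehension.
import Mathlib
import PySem

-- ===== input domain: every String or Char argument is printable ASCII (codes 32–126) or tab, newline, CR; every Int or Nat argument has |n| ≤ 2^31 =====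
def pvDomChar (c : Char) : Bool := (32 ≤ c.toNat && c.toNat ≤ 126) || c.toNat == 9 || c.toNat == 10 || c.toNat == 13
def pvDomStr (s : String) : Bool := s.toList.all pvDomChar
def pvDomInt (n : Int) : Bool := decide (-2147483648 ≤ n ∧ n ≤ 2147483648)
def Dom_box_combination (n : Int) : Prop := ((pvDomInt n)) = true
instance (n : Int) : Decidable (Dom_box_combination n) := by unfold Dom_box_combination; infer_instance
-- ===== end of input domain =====

-- B replaces A's inner increment-until loop with the closed-form ceiling division (n+i-1)//i (objective: faster, asymptotic).

-- ===== PORT A =====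
-- inner 'while i * y < n: y = y + 1'; the '0 < i' conjunct is a totality guard only
-- (A only calls it with i ≥ 1, where it is vacuously true).
def boxLoopY (i n y : Int) : Int :=
  if h : i * y < n ∧ 0 < i then boxLoopY i n (y + 1) else y
  termination_by (n - i * y).toNat
  decreasing_by
    have h1 : 0 < n - i * y := by omega
    have h2 : i * (y + 1) = i * y + i := by ring
    omega

def box_combination (n : Int) : List (List Int) :=
  -- 'if not isinstance(n, int) or n <= 0: raise' → excluded by Pre_
  (PySem.List.pyRange 1 (n + 1) 1).foldl
    (fun combinations i =>
      let y := boxLoopY i n 1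
      let item : List Int := [i, y]
      combinations ++ [item]) []

-- ===== PORT B =====
def box_combination_alt (n : Int) : List (List Int) :=
  (PySem.List.pyRange 1 (n + 1) 1).map (fun i => [i, PySem.Int.floordiv (n + i - 1) i])

-- ===== PRECONDITION & SPEC =====
-- A raises ValueError exactly when n <= 0.
def Pre_box_combination (n : Int) : Prop := 1 ≤ n
instance (n : Int) : Decidable (Pre_box_combination n) := by unfold Pre_box_combination; infer_instance
def pvWitness_box_combination : Int := 5

def Spec_box_combination (n : Int) (out : List (List Int)) : Prop := out = box_combination_alt n
instance (n : Int) (out : List (List Int)) : Decidable (Spec_box_combination n out) := by unfold Spec_box_combination; infer_instance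

-- ===== CLAIM (what is proved, stated in full; the proofs are below) =====
def Claim_equal_box_combination : Prop := ∀ (n : Int), Dom_box_combination n → Pre_box_combination n → Spec_box_combination n (box_combination n)

-- ===== LEMMAS AND PROOFS =====

-- The loop computes the ceiling ⌈n/i⌉ = (n+i-1)//i, starting from any y below it.
theorem boxLoopY_eq (i n : Int) (hi : 0 < i) (hn : 1 ≤ n) :
    ∀ y : Int, y ≤ PySem.Int.floordiv (n + i - 1) i →
      boxLoopY i n y = PySem.Int.floordiv (n + i - 1) i := by
  set c := PySem.Int.floordiv (n + i - 1) i with hc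
  have key : ∀ y : Int, (i * y < n ↔ y < c) := by
    intro y
    have h1 : (y + 1) ≤ c ↔ (y + 1) * i ≤ n + i - 1 :=
      PySem.Int.le_floordiv_iff_mul_le (by omega)
    have h2 : (y + 1) * i = y * i + i := by ring
    have h3 : y * i = i * y := by ring
    omega
  intro y hy
  have hm : (c - y).toNat ≤ (c - y).toNat := le_rfl
  revert hy
  generalize hk : (c - y).toNat = k at hm
  clear hm
  induction k generalizing y with
  | zero =>
    intro hy
    have hyc : y = c := by omega
    subst hyc
    have : ¬ (i * c < n ∧ 0 < i) := by
      intro ⟨h, _⟩; rw [key] at h; omega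
    rw [boxLoopY, dif_neg this]
  | succ k ih =>
    intro hy
    rw [boxLoopY]
    by_cases h : i * y < n
    · have hlt : y < c := (key y).mp h
      simp only [h, hi, and_true, dite_true]
      exact ih (y + 1) (by omega) (by omega)
    · have : ¬ (y < c) := fun hl => h ((key y).mpr hl)
      have hyc : y = c := by omega
      subst hyc
      rw [dif_neg (by intro ⟨h', _⟩; exact h h')]

-- ===== VERDICT (by name: the statement is the Claim_ definition above) =====
theorem box_combination_spec : Claim_equal_box_combination := by
  intro n _ hn
  unfold Spec_box_combination box_combination box_combination_alt
  rw [PySem.List.foldl_append_singleton_eq_map]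
  simp only [List.nil_append]
  apply List.map_congr_left
  intro i hi
  rw [PySem.List.mem_pyRange_one] at hi
  have hi1 : 0 < i := by omega
  have hc1 : (1 : Int) ≤ PySem.Int.floordiv (n + i - 1) i := by
    rw [PySem.Int.le_floordiv_iff_mul_le (by omega)]
    omega
  rw [boxLoopY_eq i n hi1 hn 1 hc1]
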